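-- pv_equiv track=rewrite | github.com/1Money-Co/1money-react-ui | skills/1money-react-ui/scripts/check-references.py | api_block
-- ===== SOURCE A (Python) =====
-- STOP_SECTION_TITLES = ['## Examples', '## Core Principles']
--
-- def api_block(text: str) -> str:
--     if '## API' not in text:
--         return ''
--     after = text.split('## API', 1)[1]
--     end = len(after)
--     for stop in STOP_SECTION_TITLES:
--         idx = after.find(stop)
--         if idx != -1:
--             end = min(end, idx)
--     return after[:end]
-- ===== SOURCE B (Python) =====
-- def api_block(text: str) -> str:
--     if '## API' not in text:
--         return ''
--     after = text.split('## API', 1)[1]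
--     i, n = 0, len(after)
--     while i < n and not (after.startswith('## Examples', i) or after.startswith('## Core Principles', i)):
--         i += 1
--     return after[:i]
-- ===== Notes on version B (the rewrite author's own statement) =====
-- stated objective: alternative
-- what changed: replaces the find-each-stop-title-and-take-the-min index computation with a single left-to-right scan that stops at the first position where either stop heading begins
import Mathlib
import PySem

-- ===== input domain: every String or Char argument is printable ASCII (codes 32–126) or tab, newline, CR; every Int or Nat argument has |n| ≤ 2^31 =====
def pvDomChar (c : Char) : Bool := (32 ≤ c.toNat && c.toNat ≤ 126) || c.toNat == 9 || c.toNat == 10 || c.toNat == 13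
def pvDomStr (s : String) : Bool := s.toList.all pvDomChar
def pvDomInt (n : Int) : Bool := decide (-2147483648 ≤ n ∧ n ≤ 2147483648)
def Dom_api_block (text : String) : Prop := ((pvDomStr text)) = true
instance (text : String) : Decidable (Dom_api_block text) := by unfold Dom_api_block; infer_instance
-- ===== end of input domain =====

-- B replaces the find-each-stop-and-take-min index computation by a single left-to-right
-- scan stopping at the first position where either stop heading begins (alternative).

-- ===== PORT A =====
def STOP_SECTION_TITLES : List String := ["## Examples", "## Core Principles"]

def api_block (text : String) : String :=
  if PySem.Str.isIn "## API" text = false then ""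
  else
    match PySem.Str.splitMax? text "## API" 1 with
    | none => ""
    | some parts =>
      let after := (PySem.List.pyGet? parts 1).getD ""
      let e := STOP_SECTION_TITLES.foldl
        (fun e stop =>
          let idx := PySem.Str.find after stop
          if idx ≠ -1 then min e idx else e)
        (PySem.Str.len after)
      PySem.Str.slice after none (some e)

-- ===== PORT B =====
def pvStopE : List Char := "## Examples".toList
def pvStopC : List Char := "## Core Principles".toList

-- the while loop of Source B: advance i until either stop heading starts at i
def pvScan : List Char → Nat
  | [] => 0
  | c :: rest =>
      if PySem.Chars.startswith (c :: rest) pvStopE || PySem.Chars.startswith (c :: rest) pvStopC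
      then 0 else pvScan rest + 1

def api_block_alt (text : String) : String :=
  if PySem.Str.isIn "## API" text = false then ""
  else
    match PySem.Str.splitMax? text "## API" 1 with
    | none => ""
    | some parts =>
      let after := (PySem.List.pyGet? parts 1).getD ""
      PySem.Str.slice after none (some ((pvScan after.toList : Nat) : Int))

-- ===== PRECONDITION & SPEC =====
def Spec_api_block (text : String) (out : String) : Prop := out = api_block_alt text
instance (text : String) (out : String) : Decidable (Spec_api_block text out) := by unfold Spec_api_block; infer_instance

-- ===== CLAIM (what is proved, stated in full; the proofs are below) =====
def Claim_equal_api_block : Prop := ∀ (text : String), Dom_api_block text → Spec_api_block text (api_block text)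

-- ===== LEMMAS AND PROOFS =====

-- the characterisation both cut points satisfy: first position where either heading starts
def pvCut (t : List Char) (k : Nat) : Prop :=
  k ≤ t.length ∧
  (∀ j, j < k → ¬(pvStopE <+: t.drop j) ∧ ¬(pvStopC <+: t.drop j)) ∧
  (k < t.length → pvStopE <+: t.drop k ∨ pvStopC <+: t.drop k)

lemma pvCut_unique {t : List Char} {a b : Nat} (ha : pvCut t a) (hb : pvCut t b) : a = b := by
  rcases ha with ⟨haL, haMin, haHit⟩
  rcases hb with ⟨hbL, hbMin, hbHit⟩
  rcases Nat.lt_trichotomy a b with h | h | h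
  · rcases haHit (lt_of_lt_of_le h hbL) with hp | hp
    · exact absurd hp (hbMin a h).1
    · exact absurd hp (hbMin a h).2
  · exact h
  · rcases hbHit (lt_of_lt_of_le h haL) with hp | hp
    · exact absurd hp (haMin b h).1
    · exact absurd hp (haMin b h).2

lemma pvScan_cut (t : List Char) : pvCut t (pvScan t) := by
  induction t with
  | nil => exact ⟨Nat.le_refl 0, fun j hj => absurd hj (Nat.not_lt_zero j), fun h => absurd h (Nat.lt_irrefl 0)⟩
  | cons c rest ih =>
    by_cases h : (PySem.Chars.startswith (c :: rest) pvStopE || PySem.Chars.startswith (c :: rest) pvStopC) = true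
    · refine ⟨?_, ?_, ?_⟩
      · simp [pvScan, h]
      · intro j hj; simp [pvScan, h] at hj
      · intro _
        simp [pvScan, h]
        rcases Bool.or_eq_true_iff.mp h with hh | hh
        · exact Or.inl ((PySem.Chars.startswith_iff _ _).mp hh)
        · exact Or.inr ((PySem.Chars.startswith_iff _ _).mp hh)
    · have hscan : pvScan (c :: rest) = pvScan rest + 1 := by simp [pvScan, h]
      rcases ih with ⟨ihL, ihMin, ihHit⟩
      refine ⟨?_, ?_, ?_⟩
      · rw [hscan]; simpa using Nat.succ_le_succ ihL
      · intro j hj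
        rw [hscan] at hj
        cases j with
        | zero =>
          simp only [List.drop_zero]
          constructor
          · intro hp
            exact h (Bool.or_eq_true_iff.mpr (Or.inl ((PySem.Chars.startswith_iff _ _).mpr hp)))
          · intro hp
            exact h (Bool.or_eq_true_iff.mpr (Or.inr ((PySem.Chars.startswith_iff _ _).mpr hp)))
        | succ j' =>
          have : j' < pvScan rest := Nat.lt_of_succ_lt_succ hj
          simpa using ihMin j' this
      · intro hk
        rw [hscan] at hk ⊢
        have : pvScan rest < rest.length := by simpa using Nat.lt_of_succ_lt_succ hk
        simpa using ihHit this

lemma pvPrefixDrop_infix {sub t : List Char} {j : Nat} (h : sub <+: t.drop j) : sub <:+: t :=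
  h.isInfix.trans (List.drop_suffix j t).isInfix

lemma pvNoPrefixDrop {sub t : List Char} (h : PySem.Chars.find t sub = -1) :
    ∀ j : Nat, ¬(sub <+: t.drop j) := by
  intro j hp
  exact ((PySem.Chars.find_eq_neg_one_iff t sub).mp h) (pvPrefixDrop_infix hp)

lemma pvFind_cut_of_neg {t sub : List Char} (h : ¬ PySem.Chars.find t sub = -1) :
    0 ≤ PySem.Chars.find t sub ∧
    sub <+: t.drop (PySem.Chars.find t sub).toNat ∧
    (∀ j : Nat, j < (PySem.Chars.find t sub).toNat → ¬ sub <+: t.drop j) := by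
  have h0 : 0 ≤ PySem.Chars.find t sub := by
    have := PySem.Chars.neg_one_le_find t sub
    omega
  rcases PySem.Chars.find_spec h0 with ⟨h1, h2⟩
  exact ⟨h0, h1, h2⟩

-- A's folded end index equals B's scan length
lemma pvEnd_eq_scan (t : List Char) :
    (if PySem.Chars.find t pvStopC ≠ -1 then
       min (if PySem.Chars.find t pvStopE ≠ -1 then
              min (t.length : Int) (PySem.Chars.find t pvStopE)
            else (t.length : Int)) (PySem.Chars.find t pvStopC)
     else (if PySem.Chars.find t pvStopE ≠ -1 then
             min (t.length : Int) (PySem.Chars.find t pvStopE)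
           else (t.length : Int)))
    = ((pvScan t : Nat) : Int) := by
  by_cases hE : PySem.Chars.find t pvStopE = -1
  · by_cases hC : PySem.Chars.find t pvStopC = -1
    · simp only [hE, hC, ne_eq, not_true_eq_false, if_false]
      have hcut : pvCut t t.length := by
        refine ⟨Nat.le_refl _, ?_, fun h => absurd h (Nat.lt_irrefl _)⟩
        intro j _
        exact ⟨pvNoPrefixDrop hE j, pvNoPrefixDrop hC j⟩
      rw [pvCut_unique hcut (pvScan_cut t)]
    · rcases pvFind_cut_of_neg hC with ⟨h0, h1, h2⟩
      simp only [hE, hC, ne_eq, not_true_eq_false, if_false, not_false_eq_true, if_true]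
      have hle : PySem.Chars.find t pvStopC ≤ (t.length : Int) := PySem.Chars.find_le_length t pvStopC
      rw [min_eq_right hle]
      have hcut : pvCut t (PySem.Chars.find t pvStopC).toNat := by
        refine ⟨?_, ?_, fun _ => Or.inr h1⟩
        · omega
        · intro j hj
          exact ⟨pvNoPrefixDrop hE j, h2 j hj⟩
      have hu := pvCut_unique hcut (pvScan_cut t)
      omega
  · rcases pvFind_cut_of_neg hE with ⟨hE0, hE1, hE2⟩
    have hEle : PySem.Chars.find t pvStopE ≤ (t.length : Int) := PySem.Chars.find_le_length t pvStopE
    by_cases hC : PySem.Chars.find t pvStopC = -1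
    · simp only [hE, hC, ne_eq, not_true_eq_false, if_false, not_false_eq_true, if_true]
      rw [min_eq_right hEle]
      have hcut : pvCut t (PySem.Chars.find t pvStopE).toNat := by
        refine ⟨?_, ?_, fun _ => Or.inl hE1⟩
        · omega
        · intro j hj
          exact ⟨hE2 j hj, pvNoPrefixDrop hC j⟩
      have hu := pvCut_unique hcut (pvScan_cut t)
      omega
    · rcases pvFind_cut_of_neg hC with ⟨hC0, hC1, hC2⟩
      simp only [hE, hC, ne_eq, not_false_eq_true, if_true]
      rw [min_eq_right hEle]
      have hcut : pvCut t (min (PySem.Chars.find t pvStopE) (PySem.Chars.find t pvStopC)).toNat := by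
        refine ⟨?_, ?_, ?_⟩
        · omega
        · intro j hj
          exact ⟨hE2 j (by omega), hC2 j (by omega)⟩
        · intro _
          rcases le_total (PySem.Chars.find t pvStopE) (PySem.Chars.find t pvStopC) with hle | hle
          · rw [min_eq_left hle]; exact Or.inl hE1
          · rw [min_eq_right hle]; exact Or.inr hC1
      have hu := pvCut_unique hcut (pvScan_cut t)
      omega

-- ===== VERDICT (by name: the statement is the Claim_ definition above) =====
theorem api_block_spec : Claim_equal_api_block := by
  intro text _
  unfold Spec_api_block api_block api_block_alt
  by_cases h : PySem.Str.isIn "## API" text = false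
  · rw [if_pos h, if_pos h]
  · rw [if_neg h, if_neg h]
    cases hsp : PySem.Str.splitMax? text "## API" 1 with
    | none => rfl
    | some parts =>
      have hend := pvEnd_eq_scan ((PySem.List.pyGet? parts 1).getD "").toList
      simp only [pvStopE, pvStopC] at hend
      simp only [STOP_SECTION_TITLES, List.foldl, PySem.Str.find_eq, PySem.Str.len_eq]
      rw [hend]
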